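-- pv_equiv track=rewrite | github.com/elaird/hcalraw | look.py | pruned
-- ===== SOURCE A (Python) =====
-- import collections, optparse, os
--
-- def pruned(files):
--     pieces = collections.defaultdict(list)
--     for f in files:
--         filename = f.split("/")[-1]
--         pieces[filename].append(f)
--
--     out = []
--     for filename, bases in sorted(pieces.items()):
--         out.append(sorted(bases)[0])
--
--     return out
-- ===== SOURCE B (Python) =====
-- def pruned(files):
--     seen = set()
--     reps = []
--     for f in sorted(files):
--         b = f.split("/")[-1]
--         if b not in seen:
--             seen.add(b)
--             reps.append(f)
--     return sorted(reps, key=lambda f: f.split("/")[-1])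
-- ===== Notes on version B (the rewrite author's own statement) =====
-- stated objective: alternative
-- what changed: Replaced the defaultdict grouping pass and per-group sorts with: sort all paths once, keep the first path seen per basename (the minimal one, since the list is sorted), then sort these representatives by basename.
import Mathlib
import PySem

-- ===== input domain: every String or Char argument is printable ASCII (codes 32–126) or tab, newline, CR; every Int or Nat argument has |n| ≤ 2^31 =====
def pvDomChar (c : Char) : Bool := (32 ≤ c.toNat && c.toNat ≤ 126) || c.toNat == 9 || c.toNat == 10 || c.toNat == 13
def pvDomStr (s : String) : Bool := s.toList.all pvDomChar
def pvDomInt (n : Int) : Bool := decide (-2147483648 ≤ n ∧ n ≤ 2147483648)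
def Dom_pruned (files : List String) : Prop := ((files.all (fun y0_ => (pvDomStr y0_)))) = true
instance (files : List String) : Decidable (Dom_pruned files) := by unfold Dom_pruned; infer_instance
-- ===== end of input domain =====

-- B replaces A's defaultdict grouping + per-group sorts by: sort all paths once, keep the
-- first path per basename (minimal, since sorted), then sort the representatives by basename.

-- shared helper: f.split("/")[-1] (both Pythons compute it the same way);
-- "/" ≠ "" so split? is always `some`, and the split list is never empty, so the
-- `.getD` defaults are unreachable.
def pvBasename (f : String) : String :=
  (PySem.List.pyGet? ((PySem.Str.split? f "/").getD []) (-1)).getD ""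

-- ===== PORT A =====
def pruned (files : List String) : List String :=
  -- pieces = defaultdict(list); for f in files: pieces[f.split("/")[-1]].append(f)
  let pieces : PySem.Dict String (List String) :=
    files.foldl (fun d f => d.modify (pvBasename f) [] (fun bs => bs ++ [f])) PySem.Dict.empty
  -- sorted(pieces.items()): dict keys are distinct, so the tuple comparison never
  -- reaches the list component — sorting by the key is the same order
  let sortedItems := PySem.List.sorted pieces.items (fun p => p.1)
  -- for filename, bases in …: out.append(sorted(bases)[0])  (bases is never empty)
  sortedItems.foldl
    (fun out p => out ++ [(PySem.List.pyGet? (PySem.List.sorted p.2 (fun x => x)) 0).getD ""]) []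

-- ===== PORT B =====
-- the loop body: if b not in seen: seen.add(b); reps.append(f)
def prunedStep (acc : List String × PySem.Set String) (f : String) :
    List String × PySem.Set String :=
  let b := pvBasename f
  if PySem.Set.contains acc.2 b then acc else (acc.1 ++ [f], PySem.Set.add acc.2 b)

def pruned_alt (files : List String) : List String :=
  -- for f in sorted(files): …
  let scan := (PySem.List.sorted files (fun x => x)).foldl prunedStep ([], PySem.Set.empty)
  -- return sorted(reps, key=lambda f: f.split("/")[-1])
  PySem.List.sorted scan.1 (fun f => pvBasename f)

-- ===== PRECONDITION & SPEC =====
def Spec_pruned (files : List String) (out : List String) : Prop := out = pruned_alt files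
instance (files : List String) (out : List String) : Decidable (Spec_pruned files out) := by unfold Spec_pruned; infer_instance

-- ===== CLAIM (what is proved, stated in full; the proofs are below) =====
def Claim_equal_pruned : Prop := ∀ (files : List String), Dom_pruned files → Spec_pruned files (pruned files)

-- ===== LEMMAS AND PROOFS =====

-- the common target: the minimal path of each basename-group, over the sorted distinct basenames
def pvMinRep (files : List String) (b : String) : String :=
  (PySem.List.min? (files.filter (fun f2 => pvBasename f2 == b)) (fun x => x)).getD ""

def pvTarget (files : List String) : List String :=
  (PySem.List.sorted (PySem.Set.ofList (files.map pvBasename)) (fun x => x)).map (pvMinRep files)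

-- ---------- A-side ----------

-- the grouping dict looks up to the filter of the input
theorem pieces_getD (files : List String) (b : String) :
    (files.foldl (fun d f => d.modify (pvBasename f) [] (fun bs => bs ++ [f]))
      (PySem.Dict.empty : PySem.Dict String (List String))).getD b []
      = files.filter (fun f => pvBasename f == b) := by
  have h : files.foldl (fun d f => d.modify (pvBasename f) [] (fun bs => bs ++ [f]))
      (PySem.Dict.empty : PySem.Dict String (List String))
      = (files.map (fun f => (pvBasename f, f))).foldl
          (fun d p => d.modify p.1 [] (fun bs => bs ++ [p.2])) PySem.Dict.empty := by
    rw [List.foldl_map]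
  rw [h, PySem.Dict.getD_foldl_modify_append]
  simp [List.filter_map, Function.comp_def]

-- the dict's key list is the ordered set of basenames
theorem pieces_keys (files : List String) :
    (files.foldl (fun d f => d.modify (pvBasename f) [] (fun bs => bs ++ [f]))
      (PySem.Dict.empty : PySem.Dict String (List String))).keys
      = PySem.Set.ofList (files.map pvBasename) := by
  have := PySem.Dict.keys_foldl_modify_key files pvBasename ([] : List String)
    (fun _ f bs => bs ++ [f]) PySem.Dict.empty
  simpa [PySem.Set.update, PySem.Set.ofList, PySem.Dict.empty] using this

-- head of sorted xs equals min(xs) (identity key), for nonempty xs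
theorem head_sorted_eq_min (xs : List String) (h : xs ≠ []) :
    (PySem.List.pyGet? (PySem.List.sorted xs (fun x => x)) 0).getD ""
      = (PySem.List.min? xs (fun x => x)).getD "" := by
  obtain ⟨m, t, hmt⟩ : ∃ m t, PySem.List.sorted xs (fun x : String => x) = m :: t := by
    cases hs : PySem.List.sorted xs (fun x : String => x) with
    | nil => exact absurd ((PySem.List.sorted_eq_nil_iff xs _ false).mp hs) h
    | cons m t => exact ⟨m, t, rfl⟩
  cases hm : PySem.List.min? xs (fun x : String => x) with
  | none => exact absurd ((PySem.List.min?_eq_none_iff xs _).mp hm) h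
  | some m' =>
    have hmem : m ∈ xs := (PySem.List.mem_sorted xs _ false m).mp (hmt ▸ List.mem_cons_self)
    have hm'mem : m' ∈ xs := PySem.List.min?_mem hm
    have h1 : m ≤ m' := PySem.List.key_head_sorted_le xs _ hmt m' hm'mem
    have h2 : m' ≤ m := PySem.List.min?_isMin hm m hmem
    rw [hmt]
    simp [PySem.List.pyGet?, PySem.List.pyIdx?, le_antisymm h1 h2]

theorem pruned_eq_target (files : List String) : pruned files = pvTarget files := by
  unfold pruned pvTarget
  simp only []
  set keys0 := PySem.Set.ofList (files.map pvBasename) with hkeys0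
  set g : String → String × List String :=
    (fun k => (k, files.filter (fun f => pvBasename f == k))) with hg
  have hnd : (files.foldl (fun d f => d.modify (pvBasename f) [] (fun bs => bs ++ [f]))
      (PySem.Dict.empty : PySem.Dict String (List String))).keys.Nodup := by
    apply PySem.Dict.nodup_keys_foldl_modify_key
    simp [PySem.Dict.empty, PySem.Dict.keys]
  have hitems : (files.foldl (fun d f => d.modify (pvBasename f) [] (fun bs => bs ++ [f]))
      (PySem.Dict.empty : PySem.Dict String (List String))).items = keys0.map g := by
    rw [PySem.Dict.items_eq_map_keys _ hnd ([] : List String), pieces_keys]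
    refine List.map_congr_left (fun k _ => ?_)
    simp [hg, pieces_getD]
  rw [hitems]
  -- sorting the items by the key is mapping g over the sorted keys
  have hsorted : PySem.List.sorted (keys0.map g) (fun p => p.1)
      = (PySem.List.sorted keys0 (fun x => x)).map g := by
    apply PySem.List.sorted_eq_of_perm_of_pairwise_lt
    · exact (PySem.List.sorted_perm keys0 _ false).map g
    · have hp := PySem.List.sorted_ofList_pairwise_lt (files.map pvBasename)
      rw [List.pairwise_map]
      simpa [hg] using hp
  rw [hsorted, PySem.List.foldl_append_singleton_eq_map, List.nil_append, List.map_map]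
  refine List.map_congr_left (fun b hb => ?_)
  have hbmem : b ∈ files.map pvBasename := by
    have : b ∈ keys0 := (PySem.List.mem_sorted keys0 _ false b).mp hb
    exact (PySem.Set.mem_ofList _ b).mp this
  obtain ⟨f0, hf0, hbf0⟩ := List.mem_map.mp hbmem
  have hne : files.filter (fun f => pvBasename f == b) ≠ [] := by
    intro hnil
    have : f0 ∈ files.filter (fun f => pvBasename f == b) :=
      List.mem_filter.mpr ⟨hf0, by simp [hbf0]⟩
    simp [hnil] at this
  simpa [hg, pvMinRep, Function.comp] using head_sorted_eq_min _ hne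

-- ---------- B-side ----------

-- a recursive rendering of B's scan, for the induction
def repSpec : List String → PySem.Set String → List String
  | [], _ => []
  | f :: t, seen =>
    if PySem.Set.contains seen (pvBasename f) then repSpec t seen
    else f :: repSpec t (PySem.Set.add seen (pvBasename f))

theorem scan_eq (L : List String) (out : List String) (seen : PySem.Set String) :
    (L.foldl prunedStep (out, seen)).1 = out ++ repSpec L seen := by
  induction L generalizing out seen with
  | nil => simp [repSpec]
  | cons f t ih =>
    simp only [List.foldl_cons, prunedStep, repSpec]
    split
    · exact ih out seen
    · rw [ih (out ++ [f]) _]; simp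

theorem repSpec_sub {L : List String} {seen : PySem.Set String} {r : String}
    (h : r ∈ repSpec L seen) : r ∈ L := by
  induction L generalizing seen with
  | nil => simp [repSpec] at h
  | cons f t ih =>
    simp only [repSpec] at h
    split at h
    · exact List.mem_cons_of_mem f (ih h)
    · rcases List.mem_cons.mp h with h | h
      · exact h ▸ List.mem_cons_self
      · exact List.mem_cons_of_mem f (ih h)

theorem repSpec_key_mem (L : List String) (seen : PySem.Set String) (b : String) :
    b ∈ (repSpec L seen).map pvBasename ↔ (b ∈ L.map pvBasename ∧ b ∉ seen) := by
  induction L generalizing seen with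
  | nil => simp [repSpec]
  | cons f t ih =>
    simp only [repSpec]
    split
    · rename_i hc
      have hf : pvBasename f ∈ seen := (PySem.Set.contains_iff seen _).mp hc
      rw [ih]
      simp only [List.map_cons, List.mem_cons]
      constructor
      · rintro ⟨hm, hs⟩; exact ⟨Or.inr hm, hs⟩
      · rintro ⟨hm | hm, hs⟩
        · exact absurd (hm ▸ hf) hs
        · exact ⟨hm, hs⟩
    · rename_i hc
      have hf : pvBasename f ∉ seen := fun h =>
        hc ((PySem.Set.contains_iff seen _).mpr h)
      simp only [List.map_cons, List.mem_cons, ih, PySem.Set.mem_add]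
      constructor
      · rintro (h | ⟨hm, hs⟩)
        · exact ⟨Or.inl h, h ▸ hf⟩
        · exact ⟨Or.inr hm, fun hb => hs (Or.inl hb)⟩
      · rintro ⟨hm | hm, hs⟩
        · exact Or.inl hm
        · by_cases hb : b = pvBasename f
          · exact Or.inl hb
          · exact Or.inr ⟨hm, fun h => (h.elim hs hb)⟩

theorem repSpec_nodup_keys (L : List String) (seen : PySem.Set String) :
    ((repSpec L seen).map pvBasename).Nodup := by
  induction L generalizing seen with
  | nil => simp [repSpec]
  | cons f t ih =>
    simp only [repSpec]
    split
    · exact ih seen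
    · simp only [List.map_cons, List.nodup_cons]
      refine ⟨fun h => ?_, ih _⟩
      have := (repSpec_key_mem t _ _).mp h
      exact this.2 ((PySem.Set.mem_add _ _ _).mpr (Or.inr rfl))

-- on a sorted list the kept representative is minimal in its basename-group
theorem repSpec_min {L : List String} (hL : L.Pairwise (· ≤ ·)) {seen : PySem.Set String}
    {r : String} (hr : r ∈ repSpec L seen) :
    ∀ y ∈ L, pvBasename y = pvBasename r → r ≤ y := by
  induction L generalizing seen with
  | nil => simp [repSpec] at hr
  | cons f t ih =>
    have hle : ∀ y ∈ t, f ≤ y := fun y hy => List.rel_of_pairwise_cons hL hy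
    have hL' : t.Pairwise (· ≤ ·) := hL.of_cons
    simp only [repSpec] at hr
    intro y hy hky
    split at hr
    · rename_i hc
      rcases List.mem_cons.mp hy with rfl | hy'
      · -- y = f, but k r ∉ seen while k f ∈ seen: impossible
        exfalso
        have h1 : pvBasename r ∈ (repSpec t seen).map pvBasename :=
          List.mem_map_of_mem hr
        have h2 := (repSpec_key_mem t seen _).mp h1
        exact h2.2 (hky ▸ (PySem.Set.contains_iff seen _).mp hc)
      · exact ih hL' hr y hy' hky
    · rename_i hc
      rcases List.mem_cons.mp hr with rfl | hr'
      · rcases List.mem_cons.mp hy with rfl | hy'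
        · exact le_refl _
        · exact hle y hy'
      · rcases List.mem_cons.mp hy with rfl | hy'
        · -- y = f with the key of r, but k r ∉ seen.add (k f): impossible
          exfalso
          have h1 : pvBasename r ∈ (repSpec t (PySem.Set.add seen (pvBasename y))).map pvBasename :=
            List.mem_map_of_mem hr'
          have h2 := (repSpec_key_mem t _ _).mp h1
          exact h2.2 ((PySem.Set.mem_add _ _ _).mpr (Or.inr hky.symm))
        · exact ih hL' hr' y hy' hky

theorem alt_eq_target (files : List String) : pruned_alt files = pvTarget files := by
  unfold pruned_alt pvTarget
  simp only []
  rw [scan_eq, List.nil_append]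
  set S := PySem.List.sorted files (fun x : String => x) with hS
  set reps := repSpec S PySem.Set.empty with hreps
  have hSmem : ∀ x : String, x ∈ S ↔ x ∈ files := fun x => PySem.List.mem_sorted files _ false x
  have hSkeys : ∀ b, b ∈ S.map pvBasename ↔ b ∈ files.map pvBasename := by
    intro b
    simp only [List.mem_map]
    exact ⟨fun ⟨x, hx, h⟩ => ⟨x, (hSmem x).mp hx, h⟩, fun ⟨x, hx, h⟩ => ⟨x, (hSmem x).mpr hx, h⟩⟩
  have hSpair : S.Pairwise (· ≤ ·) := PySem.List.sorted_pairwise files (fun x => x)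
  have hkeymem : ∀ b, b ∈ reps.map pvBasename ↔ b ∈ files.map pvBasename := by
    intro b
    rw [hreps, repSpec_key_mem, hSkeys]
    simp [PySem.Set.empty]
  -- each group's min belongs to it and carries its basename
  have hminrep : ∀ b ∈ files.map pvBasename,
      pvMinRep files b ∈ files.filter (fun f2 => pvBasename f2 == b) ∧
      pvBasename (pvMinRep files b) = b := by
    intro b hb
    obtain ⟨f0, hf0, hbf0⟩ := List.mem_map.mp hb
    have hne : files.filter (fun f2 => pvBasename f2 == b) ≠ [] := by
      intro hnil
      have : f0 ∈ files.filter (fun f2 => pvBasename f2 == b) :=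
        List.mem_filter.mpr ⟨hf0, by simp [hbf0]⟩
      simp [hnil] at this
    cases hm : PySem.List.min? (files.filter (fun f2 => pvBasename f2 == b)) (fun x => x) with
    | none => exact absurd ((PySem.List.min?_eq_none_iff _ _).mp hm) hne
    | some m =>
      have hmmem := PySem.List.min?_mem hm
      have hkey : pvBasename m = b := by
        have := (List.mem_filter.mp hmmem).2
        simpa using this
      simp [pvMinRep, hm, hmmem, hkey]
  -- each kept representative IS its group's min
  have hrep_eq : ∀ r ∈ reps, r = pvMinRep files (pvBasename r) := by
    intro r hr
    have hrS : r ∈ S := repSpec_sub (hreps ▸ hr)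
    have hrf : r ∈ files := (hSmem r).mp hrS
    have hbmem : pvBasename r ∈ files.map pvBasename := List.mem_map_of_mem hrf
    obtain ⟨hmin_mem, hmin_key⟩ := hminrep _ hbmem
    have hminf : pvMinRep files (pvBasename r) ∈ files := (List.mem_filter.mp hmin_mem).1
    have h1 : r ≤ pvMinRep files (pvBasename r) :=
      repSpec_min hSpair (hreps ▸ hr) _ ((hSmem _).mpr hminf) hmin_key
    have h2 : pvMinRep files (pvBasename r) ≤ r := by
      cases hm : PySem.List.min? (files.filter (fun f2 => pvBasename f2 == pvBasename r))
          (fun x => x) with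
      | none =>
        exfalso
        have : r ∈ files.filter (fun f2 => pvBasename f2 == pvBasename r) :=
          List.mem_filter.mpr ⟨hrf, by simp⟩
        simp [(PySem.List.min?_eq_none_iff _ _).mp hm] at this
      | some m =>
        have : r ∈ files.filter (fun f2 => pvBasename f2 == pvBasename r) :=
          List.mem_filter.mpr ⟨hrf, by simp⟩
        have := PySem.List.min?_isMin hm r this
        simpa [pvMinRep, hm] using this
    exact le_antisymm h1 h2
  set sortedK := PySem.List.sorted (PySem.Set.ofList (files.map pvBasename)) (fun x : String => x)
    with hsK
  have hKpair : sortedK.Pairwise (· < ·) :=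
    PySem.List.sorted_ofList_pairwise_lt (files.map pvBasename)
  have hKmem : ∀ b, b ∈ sortedK ↔ b ∈ files.map pvBasename := by
    intro b
    rw [hsK, PySem.List.mem_sorted, PySem.Set.mem_ofList]
  -- the target list: strictly increasing basenames, hence Nodup
  have hys_pair : (sortedK.map (pvMinRep files)).Pairwise
      (fun a b => pvBasename a < pvBasename b) := by
    rw [List.pairwise_map]
    refine hKpair.imp_of_mem (fun {a b} ha hb hab => ?_)
    rw [(hminrep a ((hKmem a).mp ha)).2, (hminrep b ((hKmem b).mp hb)).2]
    exact hab
  have hys_nodup : (sortedK.map (pvMinRep files)).Nodup :=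
    hys_pair.imp (fun h => fun he => absurd (he ▸ rfl) (ne_of_lt h))
  have hreps_nodup : reps.Nodup := List.Nodup.of_map pvBasename (repSpec_nodup_keys S _)
  -- same elements
  have hmem_iff : ∀ x, x ∈ sortedK.map (pvMinRep files) ↔ x ∈ reps := by
    intro x
    constructor
    · rintro hx
      obtain ⟨b, hb, rfl⟩ := List.mem_map.mp hx
      have hbf : b ∈ files.map pvBasename := (hKmem b).mp hb
      obtain ⟨r, hr, hkr⟩ := List.mem_map.mp ((hkeymem b).mpr hbf)
      have := hrep_eq r hr
      rw [hkr] at this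
      exact this ▸ hr
    · intro hx
      have hb : pvBasename x ∈ files.map pvBasename := (hkeymem _).mp (List.mem_map_of_mem hx)
      have : pvBasename x ∈ sortedK := (hKmem _).mpr hb
      exact (hrep_eq x hx) ▸ List.mem_map_of_mem (f := pvMinRep files) this
  have hperm : (sortedK.map (pvMinRep files)).Perm reps :=
    (List.perm_ext_iff_of_nodup hys_nodup hreps_nodup).mpr hmem_iff
  exact PySem.List.sorted_eq_of_perm_of_pairwise_lt reps _ pvBasename hperm hys_pair

-- ===== VERDICT (by name: the statement is the Claim_ definition above) =====
theorem pruned_spec : Claim_equal_pruned := by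
  intro files _
  unfold Spec_pruned
  rw [pruned_eq_target, alt_eq_target]
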